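-- pv_equiv track=rewrite | github.com/BertusBG/BertBar | matchIngredientAbbrevs.py | AssociateIngredsAndAbbrevs
-- ===== SOURCE A (Python) =====
-- def IsValidAbbreviation(fullName, abbrev):
--     string_index = 0
--     subset_index = 0
--
--     while string_index < len(fullName) and subset_index < len(abbrev):
--         if fullName[string_index] == abbrev[subset_index]:
--             subset_index += 1
--         string_index += 1
--
--     return subset_index == len(abbrev)
--
-- def AssociateIngredsAndAbbrevs(ingredients, abbrevs):
--     ingrNames = [name for (name,available) in ingredients]
--
--     # Initialise both arrays to all unassociated (-1)
--     abbrevIdxForIngreds = [-1] * len(ingrNames)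
--     ingredIdxForAbbrevs = [-1] * len(abbrevs)
--
--     # First pass: associate unique ingredients with abbreviations
--     if True:
--         for iAbbr in range(len(abbrevs)):
--             abbr = abbrevs[iAbbr]
--             # List all the ingredients for which this abbreviation is a match
--             possibleIngredients = [n for n in range(len(ingrNames)) if IsValidAbbreviation(ingrNames[n],abbr)]
--             if len(possibleIngredients) == 1:
--                 iIngr = possibleIngredients[0]
--                 ingredIdxForAbbrevs[iAbbr] = iIngr
--                 abbrevIdxForIngreds[iIngr] = iAbbr
--
--     # Second pass: associate unique abbreviations with ingredients
--     if True:
--         for iIngr in range(len(ingrNames)):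
--             if abbrevIdxForIngreds[iIngr] >= 0:
--                 continue
--             ingr = ingrNames[iIngr]
--             # List all the abbreviations for which this ingredient is a match
--             possibleAbbrevs = [iAbbr for iAbbr in range(len(abbrevs))
--                                if ingredIdxForAbbrevs[iAbbr] < 0 and IsValidAbbreviation(ingr,abbrevs[iAbbr])]
--             if len(possibleAbbrevs) == 1:
--                 iAbbr = possibleAbbrevs[0]
--                 ingredIdxForAbbrevs[iAbbr] = iIngr
--                 abbrevIdxForIngreds[iIngr] = iAbbr
--
--     return (abbrevIdxForIngreds, ingredIdxForAbbrevs)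
-- ===== SOURCE B (Python) =====
-- def IsValidAbbreviation(fullName, abbrev):
--     it = iter(fullName)
--     return all(c in it for c in abbrev)
--
-- def AssociateIngredsAndAbbrevs(ingredients, abbrevs):
--     names = [name for (name, available) in ingredients]
--     # All matching (abbrev index, ingredient index) pairs, computed once.
--     pairs = [(a, n) for a in range(len(abbrevs)) for n in range(len(names))
--              if IsValidAbbreviation(names[n], abbrevs[a])]
--     # Group the pairs both ways.
--     byAbbr = {}
--     byIngr = {}
--     for (a, n) in pairs:
--         byAbbr.setdefault(a, []).append(n)
--         byIngr.setdefault(n, []).append(a)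
--     ingrOf = {}   # abbrev index -> ingredient index
--     abbrOf = {}   # ingredient index -> abbrev index
--     # First pass: an abbreviation matching exactly one ingredient takes it.
--     for a in range(len(abbrevs)):
--         ns = byAbbr.get(a, [])
--         if len(ns) == 1:
--             ingrOf[a] = ns[0]
--             abbrOf[ns[0]] = a
--     # Second pass over the ingredients the first pass left unassigned, in order:
--     # one matched by exactly one still-free abbreviation takes it.
--     for n in [n for n in range(len(names)) if n not in abbrOf]:
--         cand = [a for a in byIngr.get(n, []) if a not in ingrOf]
--         if len(cand) == 1:
--             ingrOf[cand[0]] = n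
--             abbrOf[n] = cand[0]
--     return ([abbrOf.get(n, -1) for n in range(len(names))],
--             [ingrOf.get(a, -1) for a in range(len(abbrevs))])
-- ===== Notes on version B (the rewrite author's own statement) =====
-- stated objective: faster
-- what changed: B computes all matching (abbrev, ingredient) index pairs once (subsequence test in consuming-iterator form), groups them both ways into dicts, keeps the assignments in two dicts materialized into the -1-arrays only at the end, and runs the second pass over a precomputed list of unassigned ingredients reading its candidates from the ingredient-side group, so the character-level subsequence loops run once instead of in both passes.
import Mathlib
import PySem

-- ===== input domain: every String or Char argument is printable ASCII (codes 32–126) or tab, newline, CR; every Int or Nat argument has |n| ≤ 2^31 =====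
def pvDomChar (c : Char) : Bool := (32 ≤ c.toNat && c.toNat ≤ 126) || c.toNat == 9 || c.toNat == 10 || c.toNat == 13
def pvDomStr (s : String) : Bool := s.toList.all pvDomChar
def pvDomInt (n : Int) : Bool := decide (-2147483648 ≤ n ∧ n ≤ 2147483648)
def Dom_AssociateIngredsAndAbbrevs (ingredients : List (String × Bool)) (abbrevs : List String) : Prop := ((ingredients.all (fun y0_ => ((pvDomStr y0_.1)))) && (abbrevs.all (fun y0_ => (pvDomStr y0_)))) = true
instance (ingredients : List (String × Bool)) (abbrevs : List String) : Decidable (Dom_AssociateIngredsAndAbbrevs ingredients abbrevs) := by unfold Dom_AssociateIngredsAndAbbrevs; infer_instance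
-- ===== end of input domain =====

-- B builds one flat list of all matching (abbrev, ingredient) index pairs, groups it both ways into
-- dicts, keeps the assignments in two dicts materialized into the -1-arrays only at the end, and runs
-- the second pass over a precomputed list of unassigned ingredients, so the subsequence loops run
-- once instead of in both passes; objective: faster (measured).

-- ===== PORT A =====
-- A's while loop over (string_index, subset_index); getD is exact: indices are in range when read.
def pvIVAloop (full abbr : List Char) (si bi : Nat) : Nat :=
  if h : si < full.length ∧ bi < abbr.length then
    if full.getD si ' ' = abbr.getD bi ' ' then pvIVAloop full abbr (si + 1) (bi + 1)
    else pvIVAloop full abbr (si + 1) bi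
  else bi
termination_by full.length - si
decreasing_by all_goals omega

def IsValidAbbreviation (fullName ab : String) : Bool :=
  pvIVAloop fullName.toList ab.toList 0 0 == ab.toList.length

def AssociateIngredsAndAbbrevs (ingredients : List (String × Bool)) (abbrevs : List String) : List Int × List Int :=
  let ingrNames := ingredients.map (fun p => p.1)
  let abbrevIdxForIngreds := List.replicate ingrNames.length (-1 : Int)
  let ingredIdxForAbbrevs := List.replicate abbrevs.length (-1 : Int)
  -- first pass
  let st1 := (List.range abbrevs.length).foldl (fun (st : List Int × List Int) iAbbr =>
      let ab := abbrevs.getD iAbbr ""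
      let possibleIngredients := (List.range ingrNames.length).filter
        (fun n => IsValidAbbreviation (ingrNames.getD n "") ab)
      if possibleIngredients.length = 1 then
        let iIngr := possibleIngredients.headD 0
        (st.1.set iIngr (Int.ofNat iAbbr), st.2.set iAbbr (Int.ofNat iIngr))
      else st) (abbrevIdxForIngreds, ingredIdxForAbbrevs)
  -- second pass
  (List.range ingrNames.length).foldl (fun (st : List Int × List Int) iIngr =>
      if st.1.getD iIngr (-1) ≥ 0 then st
      else
        let ingr := ingrNames.getD iIngr ""
        let possibleAbbrevs := (List.range abbrevs.length).filter
          (fun iAbbr => decide (st.2.getD iAbbr (-1) < 0) && IsValidAbbreviation ingr (abbrevs.getD iAbbr ""))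
        if possibleAbbrevs.length = 1 then
          let iAbbr := possibleAbbrevs.headD 0
          (st.1.set iIngr (Int.ofNat iAbbr), st.2.set iAbbr (Int.ofNat iIngr))
        else st) st1

-- ===== PORT B =====
-- B's 'c in it' on an iterator: drop through the first occurrence of c, none = not found.
def pvDropTo (c : Char) : List Char → Option (List Char)
  | [] => none
  | x :: xs => if x = c then some xs else pvDropTo c xs

-- B's 'all(c in it for c in abbrev)' over the iterator of fullName.
def pvIsSubseqChars : List Char → List Char → Bool
  | [], _ => true
  | c :: cs, full =>
    match pvDropTo c full with
    | none => false
    | some rest => pvIsSubseqChars cs rest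

def pvIsSubseq (fullName ab : String) : Bool :=
  pvIsSubseqChars ab.toList fullName.toList

def AssociateIngredsAndAbbrevs_alt (ingredients : List (String × Bool)) (abbrevs : List String) : List Int × List Int :=
  let names := ingredients.map (fun p => p.1)
  -- all matching (abbrev index, ingredient index) pairs
  let pairs := (List.range abbrevs.length).flatMap (fun a =>
    (List.range names.length).filterMap (fun n =>
      if pvIsSubseq (names.getD n "") (abbrevs.getD a "") then some (a, n) else none))
  -- group them both ways (byAbbr, byIngr)
  let grp := pairs.foldl (fun (g : PySem.Dict Nat (List Nat) × PySem.Dict Nat (List Nat)) p =>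
      (g.1.modify p.1 [] (· ++ [p.2]), g.2.modify p.2 [] (· ++ [p.1])))
      (PySem.Dict.empty, PySem.Dict.empty)
  -- first pass: (ingrOf, abbrOf) as dicts
  let st1 := (List.range abbrevs.length).foldl (fun (st : PySem.Dict Nat Int × PySem.Dict Nat Int) a =>
      let ns := grp.1.getD a []
      if ns.length = 1 then
        (st.1.insert a (Int.ofNat (ns.headD 0)), st.2.insert (ns.headD 0) (Int.ofNat a))
      else st) (PySem.Dict.empty, PySem.Dict.empty)
  -- second pass over the ingredients the first pass left unassigned
  let st2 := ((List.range names.length).filter (fun n => !st1.2.contains n)).foldl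
      (fun (st : PySem.Dict Nat Int × PySem.Dict Nat Int) n =>
        let cand := (grp.2.getD n []).filter (fun a => !st.1.contains a)
        if cand.length = 1 then
          (st.1.insert (cand.headD 0) (Int.ofNat n), st.2.insert n (Int.ofNat (cand.headD 0)))
        else st) st1
  ((List.range names.length).map (fun n => st2.2.getD n (-1)),
   (List.range abbrevs.length).map (fun a => st2.1.getD a (-1)))

-- ===== PRECONDITION & SPEC =====
def Spec_AssociateIngredsAndAbbrevs (ingredients : List (String × Bool)) (abbrevs : List String) (out : List Int × List Int) : Prop := out = AssociateIngredsAndAbbrevs_alt ingredients abbrevs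
instance (ingredients : List (String × Bool)) (abbrevs : List String) (out : List Int × List Int) : Decidable (Spec_AssociateIngredsAndAbbrevs ingredients abbrevs out) := by unfold Spec_AssociateIngredsAndAbbrevs; infer_instance

-- ===== CLAIM (what is proved, stated in full; the proofs are below) =====
def Claim_equal_AssociateIngredsAndAbbrevs : Prop := ∀ (ingredients : List (String × Bool)) (abbrevs : List String), Dom_AssociateIngredsAndAbbrevs ingredients abbrevs → Spec_AssociateIngredsAndAbbrevs ingredients abbrevs (AssociateIngredsAndAbbrevs ingredients abbrevs)

-- ===== LEMMAS AND PROOFS =====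

-- canonical structural subsequence test, the common reference point of both subsequence loops
def pvSubseq : List Char → List Char → Bool
  | [], _ => true
  | _ :: _, [] => false
  | c :: cs, x :: xs => if x = c then pvSubseq cs xs else pvSubseq (c :: cs) xs

theorem pvSubseq_cons_dropTo (c : Char) (cs full : List Char) :
    pvSubseq (c :: cs) full = (match pvDropTo c full with
      | none => false
      | some rest => pvSubseq cs rest) := by
  induction full with
  | nil => simp [pvSubseq, pvDropTo]
  | cons x xs ih =>
    by_cases h : x = c <;> simp [pvSubseq, pvDropTo, h, ih]

theorem pvIsSubseqChars_eq (a : List Char) : ∀ f, pvIsSubseqChars a f = pvSubseq a f := by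
  induction a with
  | nil => intro f; simp [pvIsSubseqChars, pvSubseq]
  | cons c cs ih =>
    intro f
    rw [pvSubseq_cons_dropTo]
    simp only [pvIsSubseqChars]
    cases pvDropTo c f with
    | none => rfl
    | some rest => exact ih rest

theorem pvIVAloop_eq (f a : List Char) : ∀ si bi, bi ≤ a.length →
    ((pvIVAloop f a si bi == a.length) = pvSubseq (a.drop bi) (f.drop si)) := by
  intro si bi hbi
  induction si, bi using pvIVAloop.induct f a with
  | case1 si bi h heq ih =>
    rw [pvIVAloop]
    simp only [h, and_self, dite_true, heq, if_true]
    rw [List.drop_eq_getElem_cons (l := a) h.2, List.drop_eq_getElem_cons (l := f) h.1]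
    rw [List.getD_eq_getElem _ _ h.1, List.getD_eq_getElem _ _ h.2] at heq
    simp only [pvSubseq, heq, if_true]
    exact ih (by omega)
  | case2 si bi h heq ih =>
    rw [pvIVAloop]
    simp only [h, and_self, dite_true, heq, if_false]
    rw [List.drop_eq_getElem_cons (l := a) h.2, List.drop_eq_getElem_cons (l := f) h.1]
    rw [List.getD_eq_getElem _ _ h.1, List.getD_eq_getElem _ _ h.2] at heq
    simp only [pvSubseq, heq, if_false]
    rw [← List.drop_eq_getElem_cons (l := a) h.2]
    exact ih hbi
  | case3 si bi h =>
    rw [pvIVAloop]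
    simp only [h, dite_false]
    rcases Nat.lt_or_ge si f.length with hs | hs
    · have hb : bi = a.length := by omega
      subst hb
      simp [List.drop_length, pvSubseq]
    · rcases Nat.lt_or_ge bi a.length with hb | hb
      · have : f.drop si = [] := List.drop_eq_nil_of_le hs
        rw [this, List.drop_eq_getElem_cons (l := a) hb]
        simp [pvSubseq]
        omega
      · have hb' : bi = a.length := by omega
        subst hb'
        simp [List.drop_length, pvSubseq]

theorem pvValid_eq (fullName ab : String) :
    IsValidAbbreviation fullName ab = pvIsSubseq fullName ab := by
  unfold IsValidAbbreviation pvIsSubseq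
  rw [pvIsSubseqChars_eq]
  have := pvIVAloop_eq fullName.toList ab.toList 0 0 (Nat.zero_le _)
  simpa using this

-- getD through List.set, at an in-range write position
theorem pvGetD_set (l : List Int) (i j : Nat) (v d : Int) (hi : i < l.length) :
    (l.set i v).getD j d = if j = i then v else l.getD j d := by
  rw [List.getD_eq_getElem?_getD, List.getD_eq_getElem?_getD, List.getElem?_set]
  by_cases h : i = j
  · subst h; simp [hi]
  · simp [h, eq_comm]

theorem pvGetD_set_ne (l : List Int) (i j : Nat) (v d : Int) (h : j ≠ i) :
    (l.set i v).getD j d = l.getD j d := by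
  rw [List.getD_eq_getElem?_getD, List.getD_eq_getElem?_getD, List.getElem?_set,
    if_neg (fun hh => h hh.symm)]

theorem pvHeadD_mem {α : Type} (l : List α) (d : α) (h : l.length = 1) : l.headD d ∈ l := by
  cases l with
  | nil => simp at h
  | cons x t => simp

-- a fold preserves a relation between two parallel states
theorem pvFoldlRel {α β γ : Type} (R : α → β → Prop) (l : List γ) (f : α → γ → α) (g : β → γ → β)
    (h : ∀ a b x, x ∈ l → R a b → R (f a x) (g b x)) :
    ∀ a b, R a b → R (l.foldl f a) (l.foldl g b) := by
  induction l with
  | nil => intro a b hab; exact hab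
  | cons x t ih =>
    intro a b hab
    exact ih (fun a b y hy => h a b y (List.mem_cons_of_mem _ hy))
      (f a x) (g b x) (h a b x List.mem_cons_self hab)

-- filterMap with an if-some-none body is map of filter
theorem pvFilterMap_ite {α β : Type} (l : List α) (p : α → Bool) (f : α → β) :
    l.filterMap (fun x => if p x then some (f x) else none) = (l.filter p).map f := by
  induction l with
  | nil => rfl
  | cons x t ih => by_cases h : p x <;> simp [h, ih]

theorem pvFlatMap_single {α : Type} (a : Nat) (f : Nat → List α) :
    ∀ (as : List Nat), as.Nodup →
      as.flatMap (fun a' => if a' = a then f a' else []) = if a ∈ as then f a else [] := by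
  intro as
  induction as with
  | nil => simp
  | cons x t ih =>
    intro hnd
    rcases List.nodup_cons.mp hnd with ⟨hx, ht⟩
    by_cases h : x = a
    · subst h
      have : ∀ a' ∈ t, (if a' = x then f a' else []) = ([] : List α) := by
        intro a' ha'; rw [if_neg]; rintro rfl; exact hx ha'
      simp [List.flatMap_cons, List.flatMap_congr this]
    · simp [List.flatMap_cons, h, ih ht, Ne.symm h]

theorem pvFlatMap_filter {α : Type} (q : α → Bool) :
    ∀ (as : List α), as.flatMap (fun x => if q x then [x] else []) = as.filter q := by
  intro as
  induction as with
  | nil => rfl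
  | cons x t ih => by_cases h : q x <;> simp [List.flatMap_cons, h, ih]

theorem pvFilter_beq_single (n : Nat) (q : Nat → Bool) :
    ∀ (as : List Nat), as.Nodup → n ∈ as →
      as.filter (fun x => (x == n) && q x) = if q n then [n] else [] := by
  intro as
  induction as with
  | nil => simp
  | cons x t ih =>
    intro hnd hmem
    rcases List.nodup_cons.mp hnd with ⟨hx, ht⟩
    by_cases h : x = n
    · subst h
      have : t.filter (fun y => (y == x) && q y) = [] := by
        apply List.filter_eq_nil_iff.mpr
        intro y hy
        simp only [Bool.and_eq_true, beq_iff_eq]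
        rintro ⟨rfl, -⟩; exact hx hy
      by_cases hq : q x <;> simp [hq, this]
    · have hmem' : n ∈ t := by
        rcases List.mem_cons.mp hmem with h' | h'
        · exact absurd h'.symm h
        · exact h'
      simp [h, ih ht hmem']

-- the flat pair list, abstracted over the match predicate
def pvPairs (m : Nat → Nat → Bool) (N A : Nat) : List (Nat × Nat) :=
  (List.range A).flatMap (fun a =>
    (List.range N).filterMap (fun n => if m n a then some (a, n) else none))

theorem pvGroupA (m : Nat → Nat → Bool) (N A a : Nat) :
    ((pvPairs m N A).filter (fun p => p.1 == a)).map Prod.snd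
      = if a < A then (List.range N).filter (fun n => m n a) else [] := by
  unfold pvPairs
  rw [List.filter_flatMap]
  have hblk : ∀ a' : Nat,
      ((List.range N).filterMap (fun n => if m n a' then some (a', n) else none)).filter
        (fun p => p.1 == a)
      = if a' = a then ((List.range N).filter (fun n => m n a')).map (fun n => (a', n)) else [] := by
    intro a'
    rw [pvFilterMap_ite, List.filter_map]
    by_cases h : a' = a
    · subst h; simp [Function.comp_def]
    · simp [Function.comp_def, h]
  rw [List.flatMap_congr (fun a' _ => hblk a'), pvFlatMap_single a _ _ (List.nodup_range)]
  by_cases h : a < A <;> simp [h, List.mem_range]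

theorem pvGroupI (m : Nat → Nat → Bool) (N A n : Nat) (hn : n < N) :
    ((pvPairs m N A).filter (fun p => p.2 == n)).map Prod.fst
      = (List.range A).filter (fun a => m n a) := by
  unfold pvPairs
  rw [List.filter_flatMap]
  have hblk : ∀ a' : Nat,
      (((List.range N).filterMap (fun n' => if m n' a' then some (a', n') else none)).filter
        (fun p => p.2 == n)).map Prod.fst
      = if m n a' then [a'] else [] := by
    intro a'
    rw [pvFilterMap_ite, List.filter_map]
    have : ((List.range N).filter (fun n' => m n' a')).filter
        ((fun (p : Nat × Nat) => p.2 == n) ∘ (fun n' => (a', n'))) =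
        ((List.range N).filter (fun n' => m n' a')).filter (fun n' => n' == n) := rfl
    rw [this, List.filter_filter, pvFilter_beq_single n _ _ List.nodup_range (List.mem_range.mpr hn)]
    by_cases h : m n a' <;> simp [h]
  rw [List.map_flatMap, List.flatMap_congr (fun a' _ => hblk a'), pvFlatMap_filter]

-- the simulation relation between A's pair of -1-arrays and B's pair of dicts
def pvRel (N A : Nat) (st : List Int × List Int) (dst : PySem.Dict Nat Int × PySem.Dict Nat Int) : Prop :=
  st.1.length = N ∧ st.2.length = A ∧
  (∀ i : Nat, st.1.getD i (-1) = dst.2.getD i (-1)) ∧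
  (∀ a : Nat, st.2.getD a (-1) = dst.1.getD a (-1)) ∧
  (∀ k : Nat, dst.1.contains k = decide (0 ≤ dst.1.getD k (-1))) ∧
  (∀ k : Nat, dst.2.contains k = decide (0 ≤ dst.2.getD k (-1)))

theorem pvRel_init (N A : Nat) :
    pvRel N A (List.replicate N (-1), List.replicate A (-1)) (PySem.Dict.empty, PySem.Dict.empty) := by
  refine ⟨by simp, by simp, ?_, ?_, ?_, ?_⟩ <;>
    intro k <;> simp [PySem.Dict.getD_empty, PySem.Dict.contains_empty]

theorem pvRel_update (N A : Nat) (st : List Int × List Int)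
    (dst : PySem.Dict Nat Int × PySem.Dict Nat Int) (i a : Nat) (hi : i < N) (ha : a < A)
    (h : pvRel N A st dst) :
    pvRel N A (st.1.set i (Int.ofNat a), st.2.set a (Int.ofNat i))
      (dst.1.insert a (Int.ofNat i), dst.2.insert i (Int.ofNat a)) := by
  obtain ⟨h1, h2, h3, h4, h5, h6⟩ := h
  refine ⟨by simpa using h1, by simpa using h2, ?_, ?_, ?_, ?_⟩
  · intro j
    rw [pvGetD_set st.1 i j _ _ (by omega), PySem.Dict.getD_insert]
    by_cases hj : j = i <;> simp [hj, -List.getD_eq_getElem?_getD, h3]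
  · intro b
    rw [pvGetD_set st.2 a b _ _ (by omega), PySem.Dict.getD_insert]
    by_cases hb : b = a <;> simp [hb, -List.getD_eq_getElem?_getD, h4]
  · intro k
    rw [PySem.Dict.contains_insert, PySem.Dict.getD_insert]
    by_cases hk : k = a <;> simp [hk, h5]
  · intro k
    rw [PySem.Dict.contains_insert, PySem.Dict.getD_insert]
    by_cases hk : k = i <;> simp [hk, h6]

-- A's guarded second pass equals the unguarded fold over the initially-unassigned indices
theorem pvSkipStable (bodyf : List Int × List Int → Nat → List Int × List Int)
    (hloc : ∀ st i j, j ≠ i → (bodyf st i).1.getD j (-1) = st.1.getD j (-1))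
    (base : List Int × List Int) :
    ∀ (l : List Nat), l.Nodup →
      ∀ st : List Int × List Int, (∀ j ∈ l, st.1.getD j (-1) = base.1.getD j (-1)) →
      l.foldl (fun st i => if st.1.getD i (-1) ≥ 0 then st else bodyf st i) st
        = (l.filter (fun i => decide (base.1.getD i (-1) < 0))).foldl bodyf st := by
  intro l
  induction l with
  | nil => intro _ st _; rfl
  | cons x t ih =>
    intro hnd st hst
    rcases List.nodup_cons.mp hnd with ⟨hx, ht⟩
    have hxb : st.1.getD x (-1) = base.1.getD x (-1) := hst x List.mem_cons_self
    simp only [List.foldl_cons, List.filter_cons]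
    by_cases hge : base.1.getD x (-1) ≥ 0
    · rw [if_pos (by omega : st.1.getD x (-1) ≥ 0), if_neg (by simp only [decide_eq_true_eq]; omega)]
      exact ih ht st (fun j hj => hst j (List.mem_cons_of_mem _ hj))
    · rw [if_neg (by omega : ¬ st.1.getD x (-1) ≥ 0), if_pos (by simp only [decide_eq_true_eq]; omega)]
      simp only [List.foldl_cons]
      apply ih ht
      intro j hj
      rw [hloc st x j (by rintro rfl; exact hx hj)]
      exact hst j (List.mem_cons_of_mem _ hj)

-- ===== VERDICT (by name: the statement is the Claim_ definition above) =====
theorem AssociateIngredsAndAbbrevs_spec : Claim_equal_AssociateIngredsAndAbbrevs := by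
  intro ingredients abbrevs _
  unfold Spec_AssociateIngredsAndAbbrevs AssociateIngredsAndAbbrevs AssociateIngredsAndAbbrevs_alt
  simp only []
  set names := ingredients.map (fun p => p.1) with hnames
  set pr := List.flatMap
      (fun a => List.filterMap
        (fun n => if pvIsSubseq (names.getD n "") (abbrevs.getD a "") then some (a, n) else none)
        (List.range names.length))
      (List.range abbrevs.length) with hpr
  set grpE := List.foldl
      (fun (g : PySem.Dict Nat (List Nat) × PySem.Dict Nat (List Nat)) (p : Nat × Nat) =>
        (g.1.modify p.1 [] fun x => x ++ [p.2], g.2.modify p.2 [] fun x => x ++ [p.1]))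
      (PySem.Dict.empty, PySem.Dict.empty) pr with hgrp
  -- the two grouped tables, characterized
  have hpairs : pr = pvPairs (fun n a => pvIsSubseq (names.getD n "") (abbrevs.getD a ""))
      names.length abbrevs.length := rfl
  have hsplit : grpE = (pr.foldl (fun d p => d.modify p.1 [] fun x => x ++ [p.2]) PySem.Dict.empty,
      pr.foldl (fun d p => d.modify p.2 [] fun x => x ++ [p.1]) PySem.Dict.empty) := by
    rw [hgrp]
    exact PySem.List.foldl_prod_mk
      (f := fun (d : PySem.Dict Nat (List Nat)) (p : Nat × Nat) => d.modify p.1 [] fun x => x ++ [p.2])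
      (g := fun (d : PySem.Dict Nat (List Nat)) (p : Nat × Nat) => d.modify p.2 [] fun x => x ++ [p.1])
      (l := pr) (a := PySem.Dict.empty) (b := PySem.Dict.empty)
  have hg1 : ∀ a : Nat, grpE.1.getD a []
      = if a < abbrevs.length then
          (List.range names.length).filter (fun n => pvIsSubseq (names.getD n "") (abbrevs.getD a ""))
        else [] := by
    intro a
    rw [hsplit]
    show (pr.foldl (fun d p => d.modify p.1 [] fun x => x ++ [p.2]) PySem.Dict.empty).getD a [] = _
    rw [PySem.Dict.getD_foldl_modify_append, PySem.Dict.getD_empty, List.nil_append, hpairs]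
    exact pvGroupA _ _ _ a
  have hg2 : ∀ n : Nat, n < names.length → grpE.2.getD n []
      = (List.range abbrevs.length).filter (fun a => pvIsSubseq (names.getD n "") (abbrevs.getD a "")) := by
    intro n hn
    rw [hsplit]
    show (pr.foldl (fun d p => d.modify p.2 [] fun x => x ++ [p.1]) PySem.Dict.empty).getD n [] = _
    have hswap : pr.foldl (fun d p => d.modify p.2 [] fun x => x ++ [p.1]) PySem.Dict.empty
        = (pr.map (fun p => (p.2, p.1))).foldl (fun d p => d.modify p.1 [] fun x => x ++ [p.2])
            PySem.Dict.empty := by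
      rw [List.foldl_map]
    rw [hswap, PySem.Dict.getD_foldl_modify_append, PySem.Dict.getD_empty, List.nil_append, hpairs,
      List.filter_map, List.map_map]
    exact pvGroupI _ _ _ n hn
  -- first passes: the relation holds after pass 1
  set st1A := List.foldl
      (fun (st : List Int × List Int) iAbbr =>
        if (List.filter (fun n => IsValidAbbreviation (names.getD n "") (abbrevs.getD iAbbr ""))
              (List.range names.length)).length = 1 then
          (st.1.set
              ((List.filter (fun n => IsValidAbbreviation (names.getD n "") (abbrevs.getD iAbbr ""))
                  (List.range names.length)).headD 0) (Int.ofNat iAbbr),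
            st.2.set iAbbr
              (Int.ofNat
                ((List.filter (fun n => IsValidAbbreviation (names.getD n "") (abbrevs.getD iAbbr ""))
                    (List.range names.length)).headD 0)))
        else st)
      (List.replicate names.length (-1), List.replicate abbrevs.length (-1))
      (List.range abbrevs.length) with hst1A
  set st1B := List.foldl
      (fun (st : PySem.Dict Nat Int × PySem.Dict Nat Int) a =>
        if (grpE.1.getD a []).length = 1 then
          (st.1.insert a (Int.ofNat ((grpE.1.getD a []).headD 0)),
            st.2.insert ((grpE.1.getD a []).headD 0) (Int.ofNat a))
        else st)
      (PySem.Dict.empty, PySem.Dict.empty) (List.range abbrevs.length) with hst1B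
  have hrel1 : pvRel names.length abbrevs.length st1A st1B := by
    rw [hst1A, hst1B]
    apply pvFoldlRel (pvRel names.length abbrevs.length) _ _ _ _ _ _ (pvRel_init _ _)
    intro sa sb x hx hR
    have hxA : x < abbrevs.length := List.mem_range.mp hx
    have hfA : List.filter (fun n => IsValidAbbreviation (names.getD n "") (abbrevs.getD x ""))
        (List.range names.length)
        = List.filter (fun n => pvIsSubseq (names.getD n "") (abbrevs.getD x ""))
            (List.range names.length) :=
      List.filter_congr (fun n _ => by rw [pvValid_eq])
    have hfB : grpE.1.getD x []
        = List.filter (fun n => pvIsSubseq (names.getD n "") (abbrevs.getD x ""))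
            (List.range names.length) := by
      rw [hg1 x, if_pos hxA]
    simp only [hfA, hfB]
    by_cases hlen : (List.filter (fun n => pvIsSubseq (names.getD n "") (abbrevs.getD x ""))
        (List.range names.length)).length = 1
    · rw [if_pos hlen, if_pos hlen]
      have hmem := pvHeadD_mem _ 0 hlen
      have hdlt : (List.filter (fun n => pvIsSubseq (names.getD n "") (abbrevs.getD x ""))
          (List.range names.length)).headD 0 < names.length :=
        List.mem_range.mp (List.mem_of_mem_filter hmem)
      exact pvRel_update _ _ _ _ _ _ hdlt hxA hR
    · rw [if_neg hlen, if_neg hlen]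
      exact hR
  -- second passes
  set unB := List.filter (fun n => !st1B.2.contains n) (List.range names.length) with hunB
  set st2B := List.foldl
      (fun (st : PySem.Dict Nat Int × PySem.Dict Nat Int) n =>
        if (List.filter (fun a => !st.1.contains a) (grpE.2.getD n [])).length = 1 then
          (st.1.insert ((List.filter (fun a => !st.1.contains a) (grpE.2.getD n [])).headD 0)
              (Int.ofNat n),
            st.2.insert n
              (Int.ofNat
                ((List.filter (fun a => !st.1.contains a) (grpE.2.getD n [])).headD 0)))
        else st)
      st1B unB with hst2B
  -- A's guarded second pass becomes the unguarded fold over the initially-unassigned indices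
  have hloc : ∀ (st : List Int × List Int) (i j : Nat), j ≠ i →
      ((fun (st : List Int × List Int) iIngr =>
        if (List.filter
              (fun iAbbr => decide (st.2.getD iAbbr (-1) < 0) &&
                IsValidAbbreviation (names.getD iIngr "") (abbrevs.getD iAbbr ""))
              (List.range abbrevs.length)).length = 1 then
          (st.1.set iIngr
              (Int.ofNat
                ((List.filter
                    (fun iAbbr => decide (st.2.getD iAbbr (-1) < 0) &&
                      IsValidAbbreviation (names.getD iIngr "") (abbrevs.getD iAbbr ""))
                    (List.range abbrevs.length)).headD 0)),
            st.2.set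
              ((List.filter
                  (fun iAbbr => decide (st.2.getD iAbbr (-1) < 0) &&
                    IsValidAbbreviation (names.getD iIngr "") (abbrevs.getD iAbbr ""))
                  (List.range abbrevs.length)).headD 0) (Int.ofNat iIngr))
        else st) st i).1.getD j (-1) = st.1.getD j (-1) := by
    intro st i j hj
    by_cases hc : (List.filter
        (fun iAbbr => decide (st.2.getD iAbbr (-1) < 0) &&
          IsValidAbbreviation (names.getD i "") (abbrevs.getD iAbbr ""))
        (List.range abbrevs.length)).length = 1
    · simp only [if_pos hc]
      exact pvGetD_set_ne _ _ _ _ _ hj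
    · simp only [if_neg hc]
  rw [pvSkipStable _ hloc st1A (List.range names.length) List.nodup_range st1A (fun j _ => rfl)]
  -- the unassigned lists agree
  have hfilt : List.filter (fun i => decide (st1A.1.getD i (-1) < 0)) (List.range names.length)
      = unB := by
    rw [hunB]
    apply List.filter_congr
    intro i _
    obtain ⟨-, -, h3, -, -, h6⟩ := hrel1
    rw [h3 i, h6 i]
    by_cases hv : 0 ≤ st1B.2.getD i (-1)
    · simp [hv]
      try omega
    · simp [hv]
      try omega
  rw [hfilt]
  have hrel2 : pvRel names.length abbrevs.length
      (unB.foldl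
        (fun (st : List Int × List Int) iIngr =>
          if (List.filter
                (fun iAbbr => decide (st.2.getD iAbbr (-1) < 0) &&
                  IsValidAbbreviation (names.getD iIngr "") (abbrevs.getD iAbbr ""))
                (List.range abbrevs.length)).length = 1 then
            (st.1.set iIngr
                (Int.ofNat
                  ((List.filter
                      (fun iAbbr => decide (st.2.getD iAbbr (-1) < 0) &&
                        IsValidAbbreviation (names.getD iIngr "") (abbrevs.getD iAbbr ""))
                      (List.range abbrevs.length)).headD 0)),
              st.2.set
                ((List.filter
                    (fun iAbbr => decide (st.2.getD iAbbr (-1) < 0) &&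
                      IsValidAbbreviation (names.getD iIngr "") (abbrevs.getD iAbbr ""))
                    (List.range abbrevs.length)).headD 0) (Int.ofNat iIngr))
          else st) st1A) st2B := by
    rw [hst2B]
    apply pvFoldlRel (pvRel names.length abbrevs.length) _ _ _ _ _ _ hrel1
    intro sa sb x hx hR
    have hxN : x < names.length := by
      rw [hunB] at hx
      exact List.mem_range.mp (List.mem_of_mem_filter hx)
    have hcand : List.filter (fun a => !sb.1.contains a) (grpE.2.getD x [])
        = List.filter
            (fun iAbbr => decide (sa.2.getD iAbbr (-1) < 0) &&
              IsValidAbbreviation (names.getD x "") (abbrevs.getD iAbbr ""))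
            (List.range abbrevs.length) := by
      rw [hg2 x hxN, List.filter_filter]
      apply List.filter_congr
      intro a _
      obtain ⟨-, -, -, h4, h5, -⟩ := hR
      rw [pvValid_eq, h5 a, h4 a]
      by_cases hv : 0 ≤ sb.1.getD a (-1)
      · simp [hv]
        try omega
      · simp [hv]
        try omega
    simp only [hcand]
    by_cases hlen : (List.filter
        (fun iAbbr => decide (sa.2.getD iAbbr (-1) < 0) &&
          IsValidAbbreviation (names.getD x "") (abbrevs.getD iAbbr ""))
        (List.range abbrevs.length)).length = 1
    · rw [if_pos hlen, if_pos hlen]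
      have hmem := pvHeadD_mem _ 0 hlen
      have hdlt : (List.filter
          (fun iAbbr => decide (sa.2.getD iAbbr (-1) < 0) &&
            IsValidAbbreviation (names.getD x "") (abbrevs.getD iAbbr ""))
          (List.range abbrevs.length)).headD 0 < abbrevs.length :=
        List.mem_range.mp (List.mem_of_mem_filter hmem)
      exact pvRel_update _ _ _ _ _ _ hxN hdlt hR
    · rw [if_neg hlen, if_neg hlen]
      exact hR
  -- materialize: both components agree pointwise
  obtain ⟨l1, l2, e1, e2, -, -⟩ := hrel2
  refine Prod.ext ?_ ?_
  · apply List.ext_getElem (by simpa using l1)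
    intro i h1 h2
    simp only [List.getElem_map, List.getElem_range]
    rw [← List.getD_eq_getElem _ (-1) h1]
    exact e1 i
  · apply List.ext_getElem (by simpa using l2)
    intro a h1 h2
    simp only [List.getElem_map, List.getElem_range]
    rw [← List.getD_eq_getElem _ (-1) h1]
    exact e2 a
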